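-- pv_equiv track=rewrite | github.com/arewolinski/FOMC | main.rice/preprocessing.py | remove_preliminary_text
-- ===== SOURCE A (Python) =====
-- def remove_preliminary_text(transcript_list):
--     """
--     Removes preliminary text, which is all text before the converstaion between members starts, by removing all text that
--     appears before the word CHAIRMAN appears in the transcript. In all of the transcripts I have looked at, the meaningful conversation
--     starts when the CHAIRMAN first speaks. Thus, we can remove all text from the transcript before the first instance of this word.
--
--     Inputs:
--
--     transcript_list - A list of strings where each string represents a word within the FOMC transcript
--
--     Returns: A transcript_list that is free from preliminary procedures
--     """
--     can_start = False
--     new_transcript_list = []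
--
--     for word in transcript_list:
--
--         if (word == "CHAIRMAN"):
--             can_start = True
--
--         if can_start:
--             new_transcript_list.append(word)
--
--
--     return new_transcript_list
-- ===== SOURCE B (Python) =====
-- def remove_preliminary_text(transcript_list):
--     if "CHAIRMAN" in transcript_list:
--         return transcript_list[transcript_list.index("CHAIRMAN"):]
--     return []
-- ===== Notes on version B (the rewrite author's own statement) =====
-- stated objective: simpler
-- what changed: Replaces the flag-driven accumulator loop with a locate-then-slice decomposition: test membership, find the first index of 'CHAIRMAN', and return the slice from there (empty list when absent).
import Mathlib
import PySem

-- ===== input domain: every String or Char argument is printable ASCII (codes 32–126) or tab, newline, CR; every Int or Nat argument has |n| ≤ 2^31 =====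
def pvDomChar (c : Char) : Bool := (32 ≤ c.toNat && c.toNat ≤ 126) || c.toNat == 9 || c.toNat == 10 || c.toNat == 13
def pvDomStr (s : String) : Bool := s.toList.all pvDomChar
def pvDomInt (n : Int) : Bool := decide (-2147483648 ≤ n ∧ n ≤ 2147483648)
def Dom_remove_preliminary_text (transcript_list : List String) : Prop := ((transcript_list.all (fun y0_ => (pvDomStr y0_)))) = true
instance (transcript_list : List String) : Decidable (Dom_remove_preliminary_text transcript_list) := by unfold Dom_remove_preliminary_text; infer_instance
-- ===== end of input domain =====

-- B replaces A's flag-driven accumulator loop with membership test + first index + slice (objective: simpler); no speed claim.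
-- ===== PORT A =====
-- flag-driven accumulator loop, transliterated as a foldl over (can_start, new_transcript_list)
def pvStepA (st : Bool × List String) (word : String) : Bool × List String :=
  let can_start := if word == "CHAIRMAN" then true else st.1
  (can_start, if can_start then st.2 ++ [word] else st.2)

def remove_preliminary_text (transcript_list : List String) : List String :=
  (transcript_list.foldl pvStepA (false, [])).2

-- ===== PORT B =====
-- B: membership test, first index, slice to the end
def remove_preliminary_text_alt (transcript_list : List String) : List String :=
  if transcript_list.contains "CHAIRMAN" then
    match PySem.List.index? transcript_list "CHAIRMAN" with
    | some i => PySem.List.slice transcript_list (some (i : Int)) none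
    | none => []
  else []

-- ===== PRECONDITION & SPEC =====
def Spec_remove_preliminary_text (transcript_list : List String) (out : List String) : Prop := out = remove_preliminary_text_alt transcript_list
instance (transcript_list : List String) (out : List String) : Decidable (Spec_remove_preliminary_text transcript_list out) := by unfold Spec_remove_preliminary_text; infer_instance

-- ===== CLAIM (what is proved, stated in full; the proofs are below) =====
def Claim_equal_remove_preliminary_text : Prop := ∀ (transcript_list : List String), Dom_remove_preliminary_text transcript_list → Spec_remove_preliminary_text transcript_list (remove_preliminary_text transcript_list)

-- ===== LEMMAS AND PROOFS =====

-- ===== VERDICT (by name: the statement is the Claim_ definition above) =====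
-- once the flag is true, the rest of the list is appended wholesale
theorem foldl_flag_true (xs : List String) (acc : List String) :
    xs.foldl pvStepA (true, acc) = (true, acc ++ xs) := by
  induction xs generalizing acc with
  | nil => simp
  | cons x xs ih =>
    rw [List.foldl_cons, show pvStepA (true, acc) x = (true, acc ++ [x]) by
      by_cases h : x = "CHAIRMAN" <;> simp [pvStepA, h], ih]
    simp

theorem alt_cons_self (xs : List String) :
    remove_preliminary_text_alt ("CHAIRMAN" :: xs) = "CHAIRMAN" :: xs := by
  unfold remove_preliminary_text_alt
  rw [if_pos (by simp), PySem.List.index?_cons_self]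
  show PySem.List.slice ("CHAIRMAN" :: xs) (some ((0 : Nat) : Int)) none = _
  rw [PySem.List.slice_from_natCast]
  simp

theorem alt_cons_ne (x : String) (xs : List String) (hx : x ≠ "CHAIRMAN") :
    remove_preliminary_text_alt (x :: xs) = remove_preliminary_text_alt xs := by
  unfold remove_preliminary_text_alt
  rw [PySem.List.index?_cons_of_ne xs hx]
  by_cases hm : xs.contains "CHAIRMAN"
  · have hmem : "CHAIRMAN" ∈ xs := by simpa using hm
    rw [if_pos (by simpa using Or.inr hmem), if_pos hm]
    obtain ⟨i, hi⟩ := Option.isSome_iff_exists.mp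
      ((PySem.List.index?_isSome_iff xs "CHAIRMAN").mpr hmem)
    rw [hi]
    simp only [Option.map_some]
    rw [PySem.List.slice_from_natCast, PySem.List.slice_from_natCast]
    simp
  · have hmem : "CHAIRMAN" ∉ xs := by simpa using hm
    have hn : PySem.List.index? xs "CHAIRMAN" = none :=
      (PySem.List.index?_eq_none_iff _ _).mpr hmem
    rw [hn]
    simp [hmem, Ne.symm hx]

theorem fold_eq_alt (xs : List String) (acc : List String) :
    (xs.foldl pvStepA (false, acc)).2 = acc ++ remove_preliminary_text_alt xs := by
  induction xs generalizing acc with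
  | nil => simp [remove_preliminary_text_alt]
  | cons x xs ih =>
    rw [List.foldl_cons]
    by_cases hx : x = "CHAIRMAN"
    · subst hx
      rw [show pvStepA (false, acc) "CHAIRMAN" = (true, acc ++ ["CHAIRMAN"]) by
        simp [pvStepA], foldl_flag_true, alt_cons_self]
      simp
    · rw [show pvStepA (false, acc) x = (false, acc) by simp [pvStepA, hx],
        ih, alt_cons_ne x xs hx]

theorem remove_preliminary_text_spec : Claim_equal_remove_preliminary_text := by
  intro xs _
  unfold Spec_remove_preliminary_text remove_preliminary_text
  simpa using fold_eq_alt xs []
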